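-- pv_equiv track=rewrite | github.com/dheeraj091/nmt | attention_mini_batch.py | create_sentence_batch
-- ===== SOURCE A (Python) =====
-- def create_sentence_batch(sentence_batch):
--     S = 0
--     sents = sentence_batch
--     wids, masks = [], []
--     for i in range(len(sentence_batch[0])):
--         #print "INSIDE CREATE BATCH"
--         wids.append([(sent[i] if len(sent)>i else S) for sent in sents])
--         mask = [(1 if len(sent)>i else 0) for sent in sents]
--         masks.append(mask)
--     return wids, masks
-- ===== SOURCE B (Python) =====
-- def create_sentence_batch(sentence_batch):
--     n = len(sentence_batch[0])
--     padded = [(sent + [0] * n)[:n] for sent in sentence_batch]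
--     flags = [([1] * len(sent) + [0] * n)[:n] for sent in sentence_batch]
--     wids = [list(col) for col in zip(*padded)]
--     masks = [list(col) for col in zip(*flags)]
--     return wids, masks
-- ===== Notes on version B (the rewrite author's own statement) =====
-- stated objective: idiomatic
-- what changed: B replaces A's per-column index loop with a staged pad-then-transpose: it pads every sentence to the fixed width n (and builds mask rows arithmetically as [1]*len+[0]*n truncated) and then transposes both with the built-in zip, so there is no index arithmetic or per-element length test in the transpose.
import Mathlib
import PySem

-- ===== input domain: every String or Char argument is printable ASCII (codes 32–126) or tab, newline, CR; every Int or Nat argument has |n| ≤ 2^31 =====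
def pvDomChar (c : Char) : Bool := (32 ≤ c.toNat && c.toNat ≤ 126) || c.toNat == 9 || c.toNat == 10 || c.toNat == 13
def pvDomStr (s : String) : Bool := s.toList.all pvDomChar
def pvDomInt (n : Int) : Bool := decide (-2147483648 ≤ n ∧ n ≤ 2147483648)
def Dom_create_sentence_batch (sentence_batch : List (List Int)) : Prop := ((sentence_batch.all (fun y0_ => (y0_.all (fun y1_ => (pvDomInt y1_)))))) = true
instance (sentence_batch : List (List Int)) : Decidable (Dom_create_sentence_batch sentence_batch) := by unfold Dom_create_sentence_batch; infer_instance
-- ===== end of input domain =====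

-- B pads each sentence to fixed width n and builds mask rows from lengths, then transposes both
-- with zip — a staged pad-then-transpose instead of A's per-column index loop. Objective: idiomatic.

-- ===== PORT A =====
-- for i in range(len(sentence_batch[0])): append the i-th word column and mask column
def create_sentence_batch (sentence_batch : List (List Int)) : List (List Int) × List (List Int) :=
  let sents := sentence_batch
  let n := (sentence_batch.headD []).length
  ((List.range n).map (fun i => sents.map (fun sent => if sent.length > i then sent.getD i 0 else 0)),
   (List.range n).map (fun i => sents.map (fun sent => if sent.length > i then (1 : Int) else 0)))

-- ===== PORT B =====
-- zip(*rows): emit the tuple of heads while every row is nonempty (Python's zip truncates at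
-- the shortest row); exact port of the built-in used by Source B
def pyZipStar (rows : List (List Int)) : List (List Int) :=
  match rows with
  | [] => []
  | r :: rs =>
    if h : (r :: rs).all (fun t => !t.isEmpty) then
      (r :: rs).map (fun t => t.headD 0) :: pyZipStar ((r :: rs).map List.tail)
    else []
termination_by (rows.headD []).length
decreasing_by
  simp only [List.all_cons, Bool.and_eq_true, Bool.not_eq_eq_eq_not, Bool.not_true] at h
  cases r with
  | nil => simp [List.isEmpty] at h
  | cons a t => simp [List.headD]

def create_sentence_batch_alt (sentence_batch : List (List Int)) : List (List Int) × List (List Int) :=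
  let n := (sentence_batch.headD []).length
  let padded := sentence_batch.map (fun sent => (sent ++ List.replicate n 0).take n)
  let flags := sentence_batch.map (fun sent => (List.replicate sent.length (1 : Int) ++ List.replicate n 0).take n)
  (pyZipStar padded, pyZipStar flags)

-- ===== PRECONDITION & SPEC =====
-- Pre_ excludes only the empty batch, on which Python A raises IndexError at sentence_batch[0].
def Pre_create_sentence_batch (sentence_batch : List (List Int)) : Prop := sentence_batch ≠ []
instance (sentence_batch : List (List Int)) : Decidable (Pre_create_sentence_batch sentence_batch) := by unfold Pre_create_sentence_batch; infer_instance
def pvWitness_create_sentence_batch : List (List Int) := [[1, 2], [3]]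

def Spec_create_sentence_batch (sentence_batch : List (List Int)) (out : List (List Int) × List (List Int)) : Prop := out = create_sentence_batch_alt sentence_batch
instance (sentence_batch : List (List Int)) (out : List (List Int) × List (List Int)) : Decidable (Spec_create_sentence_batch sentence_batch out) := by unfold Spec_create_sentence_batch; infer_instance

-- ===== CLAIM (what is proved, stated in full; the proofs are below) =====
def Claim_equal_create_sentence_batch : Prop := ∀ (sentence_batch : List (List Int)), Dom_create_sentence_batch sentence_batch → Pre_create_sentence_batch sentence_batch → Spec_create_sentence_batch sentence_batch (create_sentence_batch sentence_batch)

-- ===== LEMMAS AND PROOFS =====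

-- zip(*rows) of nonempty rows all of width n is the n index-columns
theorem pyZipStar_eq_columns (n : Nat) :
    ∀ (rows : List (List Int)), rows ≠ [] → (∀ r ∈ rows, r.length = n) →
      pyZipStar rows = (List.range n).map (fun i => rows.map (fun r => r.getD i 0)) := by
  induction n with
  | zero =>
      intro rows hne hlen
      match rows with
      | [] => exact absurd rfl hne
      | r :: rs =>
        have hr : r = [] := List.eq_nil_of_length_eq_zero (hlen r (by simp))
        unfold pyZipStar
        simp [hr]
  | succ n ih =>
      intro rows hne hlen
      match rows with
      | [] => exact absurd rfl hne
      | r :: rs =>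
        have hall : (r :: rs).all (fun t => !t.isEmpty) = true := by
          simp only [List.all_eq_true]
          intro t ht
          have := hlen t ht
          cases t with
          | nil => simp at this
          | cons a b => simp [List.isEmpty]
        unfold pyZipStar
        rw [dif_pos hall]
        have htail : pyZipStar ((r :: rs).map List.tail)
            = (List.range n).map (fun i => ((r :: rs).map List.tail).map (fun t => t.getD i 0)) := by
          apply ih
          · simp
          · intro t ht
            rw [List.mem_map] at ht
            obtain ⟨s, hs, rfl⟩ := ht
            have := hlen s hs
            simp [List.length_tail, this]
        rw [htail]
        conv_rhs => rw [List.range_succ_eq_map, List.map_cons, List.map_map]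
        congr 1
        · apply List.map_congr_left
          intro t ht
          have := hlen t ht
          cases t with
          | nil => simp at this
          | cons a b => simp [List.headD, List.getD]
        · apply List.map_congr_left
          intro i _
          simp only [Function.comp]
          rw [List.map_map]
          apply List.map_congr_left
          intro t ht
          have := hlen t ht
          cases t with
          | nil => simp at this
          | cons a b => simp [List.getD]

-- element i < n of the padded sentence is A's padded lookup
theorem padded_getD (sent : List Int) (n i : Nat) (hi : i < n) :
    ((sent ++ List.replicate n 0).take n).getD i 0
      = if sent.length > i then sent.getD i 0 else 0 := by
  simp only [List.getD, List.getElem?_take, List.getElem?_append, List.getElem?_replicate]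
  split_ifs <;> simp_all

-- element i < n of the flags row is A's mask bit
theorem flags_getD (sent : List Int) (n i : Nat) (hi : i < n) :
    ((List.replicate sent.length (1 : Int) ++ List.replicate n 0).take n).getD i 0
      = if sent.length > i then (1 : Int) else 0 := by
  simp only [List.getD, List.getElem?_take, List.getElem?_append, List.getElem?_replicate]
  split_ifs <;> simp_all

-- ===== VERDICT (by name: the statement is the Claim_ definition above) =====
theorem create_sentence_batch_spec : Claim_equal_create_sentence_batch := by
  intro sb _ hpre
  unfold Spec_create_sentence_batch
  simp only [create_sentence_batch, create_sentence_batch_alt]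
  set n := (sb.headD []).length with hn
  have hne : sb.map (fun sent => (sent ++ List.replicate n 0).take n) ≠ [] := by
    simpa using hpre
  have hne2 : sb.map (fun sent => (List.replicate sent.length (1 : Int) ++ List.replicate n 0).take n) ≠ [] := by
    simpa using hpre
  rw [pyZipStar_eq_columns n _ hne (by
        intro r hr; rw [List.mem_map] at hr; obtain ⟨s, _, rfl⟩ := hr
        simp [List.length_take]),
      pyZipStar_eq_columns n _ hne2 (by
        intro r hr; rw [List.mem_map] at hr; obtain ⟨s, _, rfl⟩ := hr
        simp [List.length_take])]
  refine Prod.ext ?_ ?_ <;>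
  · apply List.map_congr_left
    intro i hi
    rw [List.mem_range] at hi
    rw [List.map_map]
    apply List.map_congr_left
    intro s _
    simp only [Function.comp]
    first
      | exact (padded_getD s n i hi).symm
      | exact (flags_getD s n i hi).symm
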